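-- pv_equiv track=rewrite | github.com/shreyeahhs/digital-twin-jet-engine | main.py | infer_key_sensors
-- ===== SOURCE A (Python) =====
-- from typing import List, Dict, Optional
--
-- def infer_key_sensors(feature_order: List[str]) -> List[str]:
--     bases = set()
--     for f in feature_order:
--         if f == "HI":
--             continue
--         if f.endswith("_ma") or f.endswith("_std") or f.endswith("_diff"):
--             bases.add(f.split("_")[0])
--         else:
--             # raw sensor like 's2' or 's13' show up raw
--             if f.startswith("s"):
--                 bases.add(f)
--     # Sort sensors numerically when possible (s1, s2, s10) and fall back to lexical order
--     def _key(x: str):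
--         # If name is like 's12' -> numeric key (0, 12) so numbers come first and are ordered numerically
--         # Otherwise return (1, x) so non-numeric fall after numeric and are ordered lexically
--         tail = x[1:]
--         if tail.isdigit():
--             return (0, int(tail))
--         return (1, x)
--
--     return sorted(bases, key=_key)
-- ===== SOURCE B (Python) =====
-- def infer_key_sensors(feature_order):
--     # Single online pass: maintain `out` as a sorted, duplicate-free list and
--     # insert each base name at its position as it is discovered (no set, no sorted()).
--     def _key(x):
--         tail = x[1:]
--         if tail.isdigit():
--             return (0, int(tail))
--         return (1, x)
--
--     out = []
--     for f in feature_order: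
--         if f.endswith("_ma") or f.endswith("_std") or f.endswith("_diff"):
--             b = f.split("_")[0]
--         elif f != "HI" and f.startswith("s"):
--             b = f
--         else:
--             continue
--         if b in out:
--             continue
--         k = _key(b)
--         i = 0
--         while i < len(out) and _key(out[i]) < k:
--             i += 1
--         out.insert(i, b)
--     return out
-- ===== Notes on version B (the rewrite author's own statement) =====
-- stated objective: alternative
-- what changed: Replaces collect-into-a-set-then-sorted(key) with a single online pass that has no set and no sort call: the output list is kept sorted and duplicate-free throughout, and each parsed base name is inserted at its position by a scan (online insertion with dedup).
-- outside the precondition, e.g. on infer_key_sensors(['s1', 's01']): A returns ['s1', 's01'], B returns ['s01', 's1']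
import Mathlib
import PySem

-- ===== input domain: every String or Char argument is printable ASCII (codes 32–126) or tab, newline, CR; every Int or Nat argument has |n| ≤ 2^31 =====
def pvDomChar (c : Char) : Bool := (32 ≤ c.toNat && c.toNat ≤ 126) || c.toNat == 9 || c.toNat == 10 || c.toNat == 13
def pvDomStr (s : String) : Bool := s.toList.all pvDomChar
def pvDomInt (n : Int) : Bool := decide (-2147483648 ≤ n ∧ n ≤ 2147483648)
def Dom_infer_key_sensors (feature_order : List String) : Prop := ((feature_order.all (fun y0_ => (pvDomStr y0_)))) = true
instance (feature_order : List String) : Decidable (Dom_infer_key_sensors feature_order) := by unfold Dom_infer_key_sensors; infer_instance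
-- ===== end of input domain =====

-- B replaces A's collect-into-a-set-then-sort by a single online pass that keeps the output
-- as a sorted duplicate-free list and inserts each base at its position (objective: alternative).

-- ===== PORT A =====
-- Python's heterogeneous tuple key (0, int(tail)) / (1, x) is encoded as the lexicographic
-- sum Int ⊕ₗ String: numeric keys compare by the int and come before all string keys.
def pvKeyA (x : String) : Lex (Int ⊕ String) :=
  let tail := PySem.Str.slice x (some 1) none   -- x[1:]
  if PySem.Str.strIsdigit tail then
    toLex (Sum.inl ((PySem.Int.ofStr? tail).getD 0))  -- int(tail); exact: tail.isdigit() ⇒ some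
  else toLex (Sum.inr x)

def pvStepA (bs : PySem.Set String) (f : String) : PySem.Set String :=
  if f == "HI" then bs
  else if PySem.Str.endswith f "_ma" || PySem.Str.endswith f "_std" || PySem.Str.endswith f "_diff" then
    PySem.Set.add bs (((PySem.Str.split? f "_").getD []).headD "")  -- f.split("_")[0]; split never returns []
  else if PySem.Str.startswith f "s" then PySem.Set.add bs f
  else bs

def infer_key_sensors (feature_order : List String) : List String :=
  let bases := feature_order.foldl pvStepA PySem.Set.empty
  PySem.List.sorted bases pvKeyA false

-- ===== PORT B =====
-- the while-loop insert of Source B: walk past elements with smaller key, place b there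
def pvInsB (b : String) : List String → List String
  | [] => [b]
  | x :: t => if pvKeyA x < pvKeyA b then x :: pvInsB b t else b :: x :: t

def pvStepB (out : List String) (f : String) : List String :=
  if PySem.Str.endswith f "_ma" || PySem.Str.endswith f "_std" || PySem.Str.endswith f "_diff" then
    (if (((PySem.Str.split? f "_").getD []).headD "") ∈ out then out
     else pvInsB (((PySem.Str.split? f "_").getD []).headD "") out)
  else if f ≠ "HI" ∧ PySem.Str.startswith f "s" then
    (if f ∈ out then out else pvInsB f out)
  else out

def infer_key_sensors_alt (feature_order : List String) : List String :=
  feature_order.foldl pvStepB []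

-- ===== PRECONDITION & SPEC =====
-- the base name (if any) that one feature string contributes
def pvBase? (f : String) : Option String :=
  if f == "HI" then none
  else if PySem.Str.endswith f "_ma" || PySem.Str.endswith f "_std" || PySem.Str.endswith f "_diff" then
    some (((PySem.Str.split? f "_").getD []).headD "")
  else if PySem.Str.startswith f "s" then some f
  else none

def pvNumTail (x : String) : Bool := PySem.Str.strIsdigit (PySem.Str.slice x (some 1) none)

def pvIntTail (x : String) : Int := (PySem.Int.ofStr? (PySem.Str.slice x (some 1) none)).getD 0

-- Pre_ excludes inputs on which two DISTINCT collected base names share the same numeric key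
-- (e.g. 's1' and 's01', or 's1' and 'T1'): there the order of the tied pair in A's output is an
-- accident of Python's set hash order, which neither program can be matched against.
def Pre_infer_key_sensors (feature_order : List String) : Prop :=
  (((PySem.Set.ofList (feature_order.filterMap pvBase?)).filter pvNumTail).map pvIntTail).Nodup

instance (feature_order : List String) : Decidable (Pre_infer_key_sensors feature_order) := by
  unfold Pre_infer_key_sensors; infer_instance

def pvWitness_infer_key_sensors : List String := ["s12_ma", "s3", "HI", "T50_std", "op1", "s3_diff"]

def Spec_infer_key_sensors (feature_order : List String) (out : List String) : Prop := out = infer_key_sensors_alt feature_order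
instance (feature_order : List String) (out : List String) : Decidable (Spec_infer_key_sensors feature_order out) := by unfold Spec_infer_key_sensors; infer_instance

-- ===== CLAIM (what is proved, stated in full; the proofs are below) =====
def Claim_equal_infer_key_sensors : Prop := ∀ (feature_order : List String), Dom_infer_key_sensors feature_order → Pre_infer_key_sensors feature_order → Spec_infer_key_sensors feature_order (infer_key_sensors feature_order)

-- ===== LEMMAS AND PROOFS =====

theorem pvStepA_eq (bs : PySem.Set String) (f : String) :
    pvStepA bs f = match pvBase? f with
      | none => bs
      | some b => PySem.Set.add bs b := by
  unfold pvStepA pvBase?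
  split_ifs <;> rfl

theorem pvStepB_eq (out : List String) (f : String) :
    pvStepB out f = match pvBase? f with
      | none => out
      | some b => if b ∈ out then out else pvInsB b out := by
  unfold pvStepB pvBase?
  by_cases h : f = "HI"
  · subst h
    have e1 : (PySem.Str.endswith "HI" "_ma" || PySem.Str.endswith "HI" "_std" ||
        PySem.Str.endswith "HI" "_diff") = false := by decide
    rfl
  · have hne : (f == "HI") = false := by simp [h]
    simp only [hne, Bool.false_eq_true, if_false, ne_eq, h, not_false_iff, true_and]
    split_ifs <;> simp_all [List.headD_eq_head?_getD]

theorem pvKeyA_of_num {x : String} (h : pvNumTail x = true) :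
    pvKeyA x = toLex (Sum.inl (pvIntTail x)) := by
  simp [pvKeyA, pvNumTail, pvIntTail] at h ⊢
  simp [h]

theorem pvKeyA_of_not_num {x : String} (h : pvNumTail x = false) :
    pvKeyA x = toLex (Sum.inr x) := by
  simp [pvKeyA, pvNumTail] at h ⊢
  simp [h]

theorem pvInsB_perm (b : String) (out : List String) : (pvInsB b out).Perm (b :: out) := by
  induction out with
  | nil => simp [pvInsB]
  | cons x t ih =>
    unfold pvInsB
    split_ifs
    · exact (ih.cons x).trans (List.Perm.swap b x t)
    · exact List.Perm.refl _

theorem mem_pvInsB {y b : String} {out : List String} :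
    y ∈ pvInsB b out ↔ y = b ∨ y ∈ out := by
  rw [(pvInsB_perm b out).mem_iff, List.mem_cons]

theorem pvInsB_pairwise {b : String} {out : List String}
    (hp : out.Pairwise (fun a c => pvKeyA a < pvKeyA c))
    (hne : ∀ x ∈ out, pvKeyA x ≠ pvKeyA b) :
    (pvInsB b out).Pairwise (fun a c => pvKeyA a < pvKeyA c) := by
  induction out with
  | nil => simp [pvInsB]
  | cons x t ih =>
    rw [List.pairwise_cons] at hp
    unfold pvInsB
    split_ifs with hx
    · rw [List.pairwise_cons]
      refine ⟨?_, ih hp.2 (fun z hz => hne z (List.mem_cons_of_mem x hz))⟩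
      intro y hy
      rcases mem_pvInsB.mp hy with h | h
      · exact h ▸ hx
      · exact hp.1 y h
    · rw [List.pairwise_cons]
      have hbx : pvKeyA b < pvKeyA x :=
        lt_of_le_of_ne (le_of_not_gt hx) (fun e => hne x List.mem_cons_self e.symm)
      refine ⟨?_, List.pairwise_cons.mpr hp⟩
      intro y hy
      rcases List.mem_cons.mp hy with h | h
      · exact h ▸ hbx
      · exact hbx.trans (hp.1 y h)

-- the B fold over an accumulator is a permutation of the A fold over a permuted accumulator
theorem pvFold_perm (fo : List String) :
    ∀ acc1 acc2 : List String, acc1.Perm acc2 →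
      (fo.foldl pvStepB acc1).Perm (fo.foldl pvStepA acc2) := by
  induction fo with
  | nil => intro _ _ h; exact h
  | cons f t ih =>
    intro acc1 acc2 hperm
    simp only [List.foldl_cons]
    refine ih _ _ ?_
    cases hb : pvBase? f with
    | none => simp only [pvStepB_eq, pvStepA_eq, hb]; exact hperm
    | some b =>
      simp only [pvStepB_eq, pvStepA_eq, hb]
      by_cases hb2 : b ∈ acc1
      · have hc : PySem.Set.contains acc2 b = true := by
          simp [PySem.Set.contains, hperm.mem_iff.mp hb2]
        rw [if_pos hb2, PySem.Set.add, if_pos hc]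
        exact hperm
      · have hc : PySem.Set.contains acc2 b = false := by
          simp [PySem.Set.contains]
          exact fun h => hb2 (hperm.mem_iff.mpr h)
        rw [if_neg hb2, PySem.Set.add, hc]
        simp only [Bool.false_eq_true, if_false]
        exact (pvInsB_perm b acc1).trans
          ((hperm.cons b).trans (List.perm_append_singleton b acc2).symm)

-- invariant: the B fold keeps the accumulator strictly key-sorted, given key-injectivity
theorem pvFold_pairwise (fo : List String) :
    ∀ acc : List String,
      acc.Pairwise (fun a c => pvKeyA a < pvKeyA c) →
      (∀ x ∈ acc ++ fo.filterMap pvBase?, ∀ y ∈ acc ++ fo.filterMap pvBase?,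
        pvKeyA x = pvKeyA y → x = y) →
      (fo.foldl pvStepB acc).Pairwise (fun a c => pvKeyA a < pvKeyA c) := by
  induction fo with
  | nil => intro acc hp _; exact hp
  | cons f t ih =>
    intro acc hp hinj
    simp only [List.foldl_cons, pvStepB_eq]
    cases hb : pvBase? f with
    | none =>
      refine ih acc hp ?_
      intro x hx y hy
      have hsub : acc ++ t.filterMap pvBase? = acc ++ (f :: t).filterMap pvBase? := by
        simp [hb]
      exact hinj x (hsub ▸ hx) y (hsub ▸ hy)
    | some b =>
      have hmem : ∀ z, z ∈ (if b ∈ acc then acc else pvInsB b acc) ++ t.filterMap pvBase? →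
          z ∈ acc ++ (f :: t).filterMap pvBase? := by
        intro z hz
        rw [List.mem_append] at hz ⊢
        simp only [List.filterMap_cons, hb, List.mem_cons]
        rcases hz with hz | hz
        · by_cases hba : b ∈ acc
          · rw [if_pos hba] at hz; exact Or.inl hz
          · rw [if_neg hba] at hz
            rcases mem_pvInsB.mp hz with h | h
            · exact Or.inr (Or.inl h)
            · exact Or.inl h
        · exact Or.inr (Or.inr hz)
      simp only [hb]
      by_cases hba : b ∈ acc
      · rw [if_pos hba]
        refine ih acc hp ?_
        intro x hx y hy
        exact hinj x (hmem x (by rw [if_pos hba] at hmem ⊢; exact hx)) y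
          (hmem y (by rw [if_pos hba] at hmem ⊢; exact hy))
      · rw [if_neg hba]
        have hbL : b ∈ acc ++ (f :: t).filterMap pvBase? := by
          rw [List.mem_append]; right; simp [hb]
        have hp' : (pvInsB b acc).Pairwise (fun a c => pvKeyA a < pvKeyA c) := by
          refine pvInsB_pairwise hp ?_
          intro x hx he
          exact hba (hinj x (List.mem_append_left _ hx) b hbL he ▸ hx)
        rw [if_neg hba] at hmem
        refine ih _ hp' ?_
        intro x hx y hy
        exact hinj x (hmem x hx) y (hmem y hy)

-- Pre_ makes pvKeyA injective on the collected base names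
theorem pvKey_inj (fo : List String) (hpre : Pre_infer_key_sensors fo) :
    ∀ x ∈ fo.filterMap pvBase?, ∀ y ∈ fo.filterMap pvBase?,
      pvKeyA x = pvKeyA y → x = y := by
  intro x hx y hy hk
  have hx' : x ∈ PySem.Set.ofList (fo.filterMap pvBase?) := (PySem.Set.mem_ofList _ _).mpr hx
  have hy' : y ∈ PySem.Set.ofList (fo.filterMap pvBase?) := (PySem.Set.mem_ofList _ _).mpr hy
  cases hnx : pvNumTail x <;> cases hny : pvNumTail y
  · rw [pvKeyA_of_not_num hnx, pvKeyA_of_not_num hny] at hk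
    exact Sum.inr.inj (toLex.injective hk)
  · rw [pvKeyA_of_not_num hnx, pvKeyA_of_num hny] at hk
    exact absurd (toLex.injective hk) (by simp)
  · rw [pvKeyA_of_num hnx, pvKeyA_of_not_num hny] at hk
    exact absurd (toLex.injective hk) (by simp)
  · rw [pvKeyA_of_num hnx, pvKeyA_of_num hny] at hk
    have hit : pvIntTail x = pvIntTail y := Sum.inl.inj (toLex.injective hk)
    exact List.inj_on_of_nodup_map hpre (List.mem_filter.mpr ⟨hx', hnx⟩)
      (List.mem_filter.mpr ⟨hy', hny⟩) hit

-- ===== VERDICT =====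
theorem infer_key_sensors_spec : Claim_equal_infer_key_sensors := by
  intro fo _ hpre
  unfold Spec_infer_key_sensors infer_key_sensors infer_key_sensors_alt
  have hperm : (fo.foldl pvStepB []).Perm (fo.foldl pvStepA PySem.Set.empty) :=
    pvFold_perm fo [] PySem.Set.empty (List.Perm.refl _)
  have hpw : (fo.foldl pvStepB []).Pairwise (fun a c => pvKeyA a < pvKeyA c) := by
    refine pvFold_pairwise fo [] List.Pairwise.nil ?_
    simpa using pvKey_inj fo hpre
  exact PySem.List.sorted_eq_of_perm_of_pairwise_lt _ _ _ hperm hpw
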